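-- pv_equiv track=rewrite | github.com/emanuel1222/algoritmos-ia | genethic_a.py | converte_vetor_tabuleiro
-- ===== SOURCE A (Python) =====
-- def converte_vetor_tabuleiro(VT):
--     '''
--     Recebe um vetor representando um tabuleiro
--     com N rainhas, uma por coluna e retorna
--     uma lista de lista de 0 e 1 representando
--     um tabuleiro com as rainhas.
--
--     '''
--     N = len(VT)
--
--     L = [0]*N
--     T = []
--     for i in range(N):
--         T += [L.copy()]
--
--     for lin in range(N):
--         for col in range(N):
--             if lin+1 == VT[col]:
--                 T[lin][col] = 1
--
--     return T
-- ===== SOURCE B (Python) =====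
-- def converte_vetor_tabuleiro(VT):
--     N = len(VT)
--     T = [[0] * N for _ in range(N)]
--     for col, v in enumerate(VT):
--         row = v - 1
--         if 0 <= row < N:
--             T[row][col] = 1
--     return T
-- ===== Notes on version B (the rewrite author's own statement) =====
-- stated objective: faster
-- what changed: Replaces the O(N^2) nested row/column scan that tests lin+1 == VT[col] for every cell with a single O(N) pass over the columns that directly indexes T[VT[col]-1][col] = 1 (guarded by range), after building the zero board.
import Mathlib
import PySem

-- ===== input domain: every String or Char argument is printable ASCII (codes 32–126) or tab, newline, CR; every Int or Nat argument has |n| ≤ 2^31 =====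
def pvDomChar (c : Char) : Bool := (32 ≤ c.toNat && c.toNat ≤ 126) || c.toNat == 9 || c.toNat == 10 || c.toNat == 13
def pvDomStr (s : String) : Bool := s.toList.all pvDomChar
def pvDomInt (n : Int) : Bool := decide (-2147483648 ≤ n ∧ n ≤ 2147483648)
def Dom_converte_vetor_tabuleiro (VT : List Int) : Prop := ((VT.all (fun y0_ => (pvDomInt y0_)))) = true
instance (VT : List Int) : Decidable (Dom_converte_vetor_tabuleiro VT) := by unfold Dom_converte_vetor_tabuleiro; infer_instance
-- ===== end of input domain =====

-- B replaces A's nested N×N match scan by one guarded direct-index placement pass over the columns.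

-- ===== PORT A =====
-- literal port of A: build the zero board by repeated append, then the nested lin/col scan
-- (VT[col] is always indexed with 0 ≤ col < len(VT) here, so getD is exact for Python's VT[col])
def converte_vetor_tabuleiro (VT : List Int) : List (List Int) :=
  let N := VT.length
  let L : List Int := List.replicate N 0
  let T0 := (List.range N).foldl (fun T _ => T ++ [L]) ([] : List (List Int))
  (List.range N).foldl (fun T (lin : Nat) =>
    (List.range N).foldl (fun T (col : Nat) =>
      if ((lin : Int) + 1 = VT.getD col 0) then T.modify lin (fun row => row.set col 1) else T) T) T0

-- ===== PORT B =====
-- port of B: zero board by comprehension, one pass over enumerate(VT) placing each queen directly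
def converte_vetor_tabuleiro_alt (VT : List Int) : List (List Int) :=
  let N := VT.length
  let T0 := (List.range N).map (fun _ => (List.replicate N 0 : List Int))
  (PySem.List.enumerate VT 0).foldl (fun T (p : Int × Int) =>
    let row := p.2 - 1
    if 0 ≤ row ∧ row < (N : Int) then T.modify row.toNat (fun r => r.set p.1.toNat 1) else T) T0

-- ===== PRECONDITION & SPEC =====
def Spec_converte_vetor_tabuleiro (VT : List Int) (out : List (List Int)) : Prop := out = converte_vetor_tabuleiro_alt VT
instance (VT : List Int) (out : List (List Int)) : Decidable (Spec_converte_vetor_tabuleiro VT out) := by unfold Spec_converte_vetor_tabuleiro; infer_instance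

-- ===== CLAIM (what is proved, stated in full; the proofs are below) =====
def Claim_equal_converte_vetor_tabuleiro : Prop := ∀ (VT : List Int), Dom_converte_vetor_tabuleiro VT → Spec_converte_vetor_tabuleiro VT (converte_vetor_tabuleiro VT)

-- ===== LEMMAS AND PROOFS =====

-- cell read (0 out of range), and the N×N shape invariant
def pvGC (T : List (List Int)) (r c : Nat) : Int := (T.getD r []).getD c 0

def pvShape (N : Nat) (T : List (List Int)) : Prop :=
  T.length = N ∧ ∀ (i : Nat) (row : List Int), T[i]? = some row → row.length = N

theorem pvShape_replicate (N : Nat) : pvShape N (List.replicate N (List.replicate N (0:Int))) := by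
  unfold pvShape
  refine ⟨by simp, ?_⟩
  intro i row h
  rw [List.getElem?_replicate] at h
  split at h
  · cases h; simp
  · simp at h

theorem pvRow_zero (n c : Nat) : (List.replicate n (0:Int)).getD c 0 = 0 := by
  rw [List.getD_eq_getElem?_getD, List.getElem?_replicate]
  split <;> simp

theorem pvGC_replicate (N r c : Nat) :
    pvGC (List.replicate N (List.replicate N (0:Int))) r c = 0 := by
  unfold pvGC
  have h : (List.replicate N (List.replicate N (0:Int))).getD r [] = List.replicate N 0 ∨
      (List.replicate N (List.replicate N (0:Int))).getD r [] = [] := by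
    rw [List.getD_eq_getElem?_getD, List.getElem?_replicate]
    split <;> simp
  rcases h with h | h <;> rw [h]
  · exact pvRow_zero N c
  · simp

theorem pvShape_set {N : Nat} {T : List (List Int)} (h : pvShape N T) (r c : Nat) :
    pvShape N (T.modify r (fun row => row.set c 1)) := by
  obtain ⟨h1, h2⟩ := h
  refine ⟨by simp [h1], ?_⟩
  intro i row hrow
  rw [List.getElem?_modify] at hrow
  cases hT : T[i]? with
  | none => simp [hT] at hrow
  | some row0 =>
    have := h2 i row0 hT
    simp only [hT, Option.map_eq_map, Option.map_some] at hrow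
    split at hrow
    · cases hrow; simpa using this
    · cases hrow; exact this

theorem pvGC_set {N : Nat} {T : List (List Int)} (h : pvShape N T)
    {r c : Nat} (hr : r < N) (hc : c < N) (r' c' : Nat) :
    pvGC (T.modify r (fun row => row.set c 1)) r' c' =
      if r' = r ∧ c' = c then 1 else pvGC T r' c' := by
  obtain ⟨h1, h2⟩ := h
  unfold pvGC
  simp only [List.getD_eq_getElem?_getD, List.getElem?_modify]
  by_cases hrr : r = r'
  · subst hrr
    have hlt : r < T.length := by omega
    have hsome : T[r]? = some T[r] := List.getElem?_eq_getElem hlt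
    have hlen : (T[r]).length = N := h2 r _ hsome
    rw [hsome]
    simp only [Option.map_eq_map, Option.map_some, if_true, true_and,
      Option.getD_some]
    rw [List.getElem?_set]
    by_cases hcc : c = c'
    · subst hcc
      rw [if_pos rfl, if_pos (by omega), if_pos rfl]
      simp
    · rw [if_neg hcc, if_neg (fun hh => hcc hh.symm)]
  · have hid : ((fun a => if r = r' then a.set c 1 else a) <$> T[r']?) = T[r']? := by
      cases T[r']? <;> simp [hrr]
    rw [hid, if_neg (by tauto)]

-- ===== A side: characterise the nested scan =====

theorem pvA_inner (VT : List Int) (lin : Nat) (hlin : lin < VT.length) :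
    ∀ (cols : List Nat) (T : List (List Int)), (∀ x ∈ cols, x < VT.length) → pvShape VT.length T →
    pvShape VT.length (cols.foldl (fun T (col : Nat) =>
        if ((lin : Int) + 1 = VT.getD col 0) then T.modify lin (fun row => row.set col 1) else T) T) ∧
    ∀ r c, pvGC (cols.foldl (fun T (col : Nat) =>
        if ((lin : Int) + 1 = VT.getD col 0) then T.modify lin (fun row => row.set col 1) else T) T) r c =
      if r = lin ∧ c ∈ cols ∧ ((lin : Int) + 1 = VT.getD c 0) then 1 else pvGC T r c := by
  intro cols
  induction cols with
  | nil => intro T _ hS; exact ⟨hS, by intro r c; simp⟩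
  | cons a cols ih =>
    intro T hb hS
    simp only [List.foldl_cons]
    have ha : a < VT.length := hb a (by simp)
    have hb' : ∀ x ∈ cols, x < VT.length := fun x hx => hb x (by simp [hx])
    by_cases hcond : ((lin : Int) + 1 = VT.getD a 0)
    · rw [if_pos hcond]
      obtain ⟨hSf, hgc⟩ := ih _ hb' (pvShape_set hS lin a)
      refine ⟨hSf, ?_⟩
      intro r c
      rw [hgc r c, pvGC_set hS hlin ha r c]
      simp only [List.mem_cons]
      clear hgc hSf ih hS hb hb' ha hlin
      split_ifs <;> simp_all
    · rw [if_neg hcond]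
      obtain ⟨hSf, hgc⟩ := ih _ hb' hS
      refine ⟨hSf, ?_⟩
      intro r c
      rw [hgc r c]
      simp only [List.mem_cons]
      clear hgc hSf ih hS hb hb' ha hlin
      split_ifs <;> simp_all

theorem pvA_outer (VT : List Int) :
    ∀ (lins : List Nat) (T : List (List Int)), (∀ x ∈ lins, x < VT.length) → pvShape VT.length T →
    pvShape VT.length (lins.foldl (fun T (lin : Nat) =>
        (List.range VT.length).foldl (fun T (col : Nat) =>
          if ((lin : Int) + 1 = VT.getD col 0) then T.modify lin (fun row => row.set col 1) else T) T) T) ∧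
    ∀ r c, pvGC (lins.foldl (fun T (lin : Nat) =>
        (List.range VT.length).foldl (fun T (col : Nat) =>
          if ((lin : Int) + 1 = VT.getD col 0) then T.modify lin (fun row => row.set col 1) else T) T) T) r c =
      if r ∈ lins ∧ c < VT.length ∧ ((r : Int) + 1 = VT.getD c 0) then 1 else pvGC T r c := by
  intro lins
  induction lins with
  | nil => intro T _ hS; exact ⟨hS, by intro r c; simp⟩
  | cons a lins ih =>
    intro T hb hS
    simp only [List.foldl_cons]
    have ha : a < VT.length := hb a (by simp)
    have hb' : ∀ x ∈ lins, x < VT.length := fun x hx => hb x (by simp [hx])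
    obtain ⟨hS1, hgc1⟩ := pvA_inner VT a ha (List.range VT.length) T (by simp) hS
    obtain ⟨hSf, hgc⟩ := ih _ hb' hS1
    refine ⟨hSf, ?_⟩
    intro r c
    rw [hgc r c, hgc1 r c]
    simp only [List.mem_cons, List.mem_range]
    clear hgc hSf ih hS1 hgc1 hS hb hb' ha
    by_cases h1 : r = a
    · subst h1
      split_ifs <;> tauto
    · split_ifs <;> tauto

theorem pvA_build (L : List Int) (n : Nat) :
    (List.range n).foldl (fun T _ => T ++ [L]) ([] : List (List Int)) = List.replicate n L := by
  induction n with
  | zero => simp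
  | succ n ih => rw [List.range_succ, List.foldl_append, ih, List.replicate_succ']; rfl

theorem pvA_char (VT : List Int) :
    pvShape VT.length (converte_vetor_tabuleiro VT) ∧
    ∀ r c, pvGC (converte_vetor_tabuleiro VT) r c =
      if r < VT.length ∧ c < VT.length ∧ ((r : Int) + 1 = VT.getD c 0) then 1 else 0 := by
  unfold converte_vetor_tabuleiro
  simp only [pvA_build]
  obtain ⟨hSf, hgc⟩ := pvA_outer VT (List.range VT.length)
    (List.replicate VT.length (List.replicate VT.length 0)) (by simp)
    (pvShape_replicate VT.length)
  refine ⟨hSf, ?_⟩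
  intro r c
  rw [hgc r c, pvGC_replicate]
  simp [List.mem_range]

-- ===== B side: characterise the placement pass =====

theorem pvB_fold (VT : List Int) :
    ∀ (ps : List (Int × Int)) (T : List (List Int)),
      (∀ p ∈ ps, 0 ≤ p.1 ∧ p.1 < (VT.length : Int)) → pvShape VT.length T →
    pvShape VT.length (ps.foldl (fun T (p : Int × Int) =>
        if 0 ≤ p.2 - 1 ∧ p.2 - 1 < (VT.length : Int) then
          T.modify (p.2 - 1).toNat (fun r => r.set p.1.toNat 1) else T) T) ∧
    ∀ r c, pvGC (ps.foldl (fun T (p : Int × Int) =>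
        if 0 ≤ p.2 - 1 ∧ p.2 - 1 < (VT.length : Int) then
          T.modify (p.2 - 1).toNat (fun r => r.set p.1.toNat 1) else T) T) r c =
      if (∃ p ∈ ps, (0 ≤ p.2 - 1 ∧ p.2 - 1 < (VT.length : Int)) ∧ (p.2 - 1).toNat = r ∧ p.1.toNat = c)
      then 1 else pvGC T r c := by
  intro ps
  induction ps with
  | nil => intro T _ hS; exact ⟨hS, by intro r c; simp⟩
  | cons a ps ih =>
    intro T hb hS
    simp only [List.foldl_cons]
    have ha : 0 ≤ a.1 ∧ a.1 < (VT.length : Int) := hb a (by simp)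
    have hb' : ∀ p ∈ ps, 0 ≤ p.1 ∧ p.1 < (VT.length : Int) := fun p hp => hb p (by simp [hp])
    by_cases hcond : 0 ≤ a.2 - 1 ∧ a.2 - 1 < (VT.length : Int)
    · rw [if_pos hcond]
      have hr : (a.2 - 1).toNat < VT.length := by omega
      have hc : a.1.toNat < VT.length := by omega
      obtain ⟨hSf, hgc⟩ := ih _ hb' (pvShape_set hS (a.2 - 1).toNat a.1.toNat)
      refine ⟨hSf, ?_⟩
      intro r c
      rw [hgc r c, pvGC_set hS hr hc r c]
      by_cases hmem : ∃ p ∈ ps, (0 ≤ p.2 - 1 ∧ p.2 - 1 < (VT.length : Int)) ∧ (p.2 - 1).toNat = r ∧ p.1.toNat = c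
      · rw [if_pos hmem, if_pos (by obtain ⟨p, hp, hq⟩ := hmem; exact ⟨p, List.mem_cons_of_mem a hp, hq⟩)]
      · rw [if_neg hmem]
        by_cases h2 : r = (a.2 - 1).toNat ∧ c = a.1.toNat
        · rw [if_pos h2, if_pos ⟨a, by simp, hcond, h2.1.symm, h2.2.symm⟩]
        · rw [if_neg h2, if_neg ?_]
          rintro ⟨p, hp, hC, h3, h4⟩
          rcases List.mem_cons.mp hp with rfl | hp'
          · exact h2 ⟨h3.symm, h4.symm⟩
          · exact hmem ⟨p, hp', hC, h3, h4⟩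
    · rw [if_neg hcond]
      obtain ⟨hSf, hgc⟩ := ih _ hb' hS
      refine ⟨hSf, ?_⟩
      intro r c
      rw [hgc r c]
      by_cases hmem : ∃ p ∈ ps, (0 ≤ p.2 - 1 ∧ p.2 - 1 < (VT.length : Int)) ∧ (p.2 - 1).toNat = r ∧ p.1.toNat = c
      · rw [if_pos hmem, if_pos (by obtain ⟨p, hp, hq⟩ := hmem; exact ⟨p, List.mem_cons_of_mem a hp, hq⟩)]
      · rw [if_neg hmem, if_neg ?_]
        rintro ⟨p, hp, hC, h3, h4⟩
        rcases List.mem_cons.mp hp with rfl | hp'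
        · exact hcond hC
        · exact hmem ⟨p, hp', hC, h3, h4⟩

theorem pvB_char (VT : List Int) :
    pvShape VT.length (converte_vetor_tabuleiro_alt VT) ∧
    ∀ r c, pvGC (converte_vetor_tabuleiro_alt VT) r c =
      if (∃ (k : Nat), ∃ _ : k < VT.length,
            (0 ≤ VT[k] - 1 ∧ VT[k] - 1 < (VT.length : Int)) ∧ (VT[k] - 1).toNat = r ∧ ((k : Int)).toNat = c)
      then 1 else 0 := by
  unfold converte_vetor_tabuleiro_alt
  have hmap : (List.range VT.length).map (fun _ => (List.replicate VT.length 0 : List Int)) =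
      List.replicate VT.length (List.replicate VT.length (0:Int)) := by
    simp [List.map_const']
  simp only [hmap]
  have hbnd : ∀ p ∈ PySem.List.enumerate VT 0, 0 ≤ p.1 ∧ p.1 < (VT.length : Int) := by
    intro p hp
    rw [PySem.List.mem_enumerate_iff] at hp
    obtain ⟨k, hk, rfl⟩ := hp
    simp only [zero_add]
    exact ⟨Int.natCast_nonneg k, by exact_mod_cast hk⟩
  obtain ⟨hSf, hgc⟩ := pvB_fold VT (PySem.List.enumerate VT 0)
    (List.replicate VT.length (List.replicate VT.length 0)) hbnd (pvShape_replicate VT.length)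
  refine ⟨hSf, ?_⟩
  intro r c
  rw [hgc r c, pvGC_replicate]
  have hiff : (∃ p ∈ PySem.List.enumerate VT 0,
      (0 ≤ p.2 - 1 ∧ p.2 - 1 < (VT.length : Int)) ∧ (p.2 - 1).toNat = r ∧ p.1.toNat = c) ↔
      (∃ (k : Nat), ∃ _ : k < VT.length,
        (0 ≤ VT[k] - 1 ∧ VT[k] - 1 < (VT.length : Int)) ∧ (VT[k] - 1).toNat = r ∧ ((k : Int)).toNat = c) := by
    constructor
    · rintro ⟨p, hp, h⟩
      rw [PySem.List.mem_enumerate_iff] at hp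
      obtain ⟨k, hk, rfl⟩ := hp
      exact ⟨k, hk, by simpa using h⟩
    · rintro ⟨k, hk, h⟩
      refine ⟨((k : Int), VT[k]), ?_, by simpa using h⟩
      rw [PySem.List.mem_enumerate_iff]
      exact ⟨k, hk, by simp⟩
  simp only [hiff]

-- extract actual list equality from shape + pointwise cells
theorem pvBoard_ext {N : Nat} {T1 T2 : List (List Int)}
    (h1 : pvShape N T1) (h2 : pvShape N T2)
    (h : ∀ r c, pvGC T1 r c = pvGC T2 r c) : T1 = T2 := by
  obtain ⟨l1, r1⟩ := h1
  obtain ⟨l2, r2⟩ := h2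
  apply List.ext_getElem (by omega)
  intro i hi1 hi2
  have hs1 : T1[i]? = some T1[i] := List.getElem?_eq_getElem hi1
  have hs2 : T2[i]? = some T2[i] := List.getElem?_eq_getElem hi2
  have hl1 := r1 i _ hs1
  have hl2 := r2 i _ hs2
  apply List.ext_getElem (by omega)
  intro j hj1 hj2
  have hcell := h i j
  unfold pvGC at hcell
  simp only [List.getD_eq_getElem?_getD] at hcell
  rw [hs1, hs2] at hcell
  simp only [Option.getD_some] at hcell
  rw [List.getElem?_eq_getElem hj1, List.getElem?_eq_getElem hj2] at hcell
  simpa using hcell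

-- ===== VERDICT (by name: the statement is the Claim_ definition above) =====
theorem converte_vetor_tabuleiro_spec : Claim_equal_converte_vetor_tabuleiro := by
  intro VT _
  unfold Spec_converte_vetor_tabuleiro
  obtain ⟨hSA, hA⟩ := pvA_char VT
  obtain ⟨hSB, hB⟩ := pvB_char VT
  apply pvBoard_ext hSA hSB
  intro r c
  rw [hA r c, hB r c]
  have hiff : (r < VT.length ∧ c < VT.length ∧ ((r : Int) + 1 = VT.getD c 0)) ↔
      (∃ (k : Nat), ∃ _ : k < VT.length,
        (0 ≤ VT[k] - 1 ∧ VT[k] - 1 < (VT.length : Int)) ∧ (VT[k] - 1).toNat = r ∧ ((k : Int)).toNat = c) := by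
    constructor
    · rintro ⟨hr, hc, heq⟩
      rw [List.getD_eq_getElem?_getD, List.getElem?_eq_getElem hc] at heq
      simp only [Option.getD_some] at heq
      exact ⟨c, hc, ⟨by omega, by omega⟩, by omega, by omega⟩
    · rintro ⟨k, hk, ⟨hp1, hp2⟩, h3, h4⟩
      have hkc : k = c := by omega
      subst hkc
      refine ⟨by omega, hk, ?_⟩
      rw [List.getD_eq_getElem?_getD, List.getElem?_eq_getElem hk]
      simp only [Option.getD_some]
      omega
  simp only [hiff]
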